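-- pv_equiv track=rewrite | github.com/Fesantt/HardenedEntropyCipher | cipher.py | _entropy_prng_next
-- ===== SOURCE A (Python) =====
-- def _entropy_prng_next(seed, counter):
--     a = 1664525
--     c = 1013904223
--     m = 2**32
--
--     state = (seed + counter) % m
--     for _ in range(3):
--         state = (a * state + c) % m
--
--     return state
-- ===== SOURCE B (Python) =====
-- def _entropy_prng_next(seed, counter):
--     # three LCG rounds collapsed into one affine step mod 2**32:
--     # A = a**3 % m, C = c*(a**2 + a + 1) % m
--     m = 2**32
--     return (2940799637 * ((seed + counter) % m) + 3519870697) % m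
-- ===== Notes on version B (the rewrite author's own statement) =====
-- stated objective: simpler
-- what changed: The three-iteration LCG loop is replaced by a single closed-form affine step with precomputed composed constants A = a^3 mod 2^32 and C = c*(a^2+a+1) mod 2^32.
import Mathlib
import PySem

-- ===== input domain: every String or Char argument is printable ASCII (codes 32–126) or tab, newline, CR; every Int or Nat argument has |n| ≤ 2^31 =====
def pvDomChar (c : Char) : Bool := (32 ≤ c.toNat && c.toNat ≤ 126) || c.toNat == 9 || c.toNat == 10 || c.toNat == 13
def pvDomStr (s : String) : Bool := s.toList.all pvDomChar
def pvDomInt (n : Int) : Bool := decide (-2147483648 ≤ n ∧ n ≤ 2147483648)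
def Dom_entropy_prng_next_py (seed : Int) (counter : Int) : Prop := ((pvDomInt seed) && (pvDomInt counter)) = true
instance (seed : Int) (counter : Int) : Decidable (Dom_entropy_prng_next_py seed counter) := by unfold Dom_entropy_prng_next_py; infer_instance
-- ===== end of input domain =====

-- B collapses the three LCG rounds into one closed-form affine step (objective: simpler).

-- ===== PORT A =====
def entropy_prng_next_py (seed : Int) (counter : Int) : Int :=
  let a : Int := 1664525
  let c : Int := 1013904223
  let m : Int := 2 ^ 32
  let state := PySem.Int.mod (seed + counter) m
  -- for _ in range(3): state = (a * state + c) % m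
  (PySem.List.pyRange 0 3 1).foldl (fun state _ => PySem.Int.mod (a * state + c) m) state

-- ===== PORT B =====
def entropy_prng_next_py_alt (seed : Int) (counter : Int) : Int :=
  let m : Int := 2 ^ 32
  PySem.Int.mod (2940799637 * PySem.Int.mod (seed + counter) m + 3519870697) m

-- ===== PRECONDITION & SPEC =====
def Spec_entropy_prng_next_py (seed : Int) (counter : Int) (out : Int) : Prop := out = entropy_prng_next_py_alt seed counter
instance (seed : Int) (counter : Int) (out : Int) : Decidable (Spec_entropy_prng_next_py seed counter out) := by unfold Spec_entropy_prng_next_py; infer_instance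

-- ===== CLAIM (what is proved, stated in full; the proofs are below) =====
def Claim_equal_entropy_prng_next_py : Prop := ∀ (seed : Int) (counter : Int), Dom_entropy_prng_next_py seed counter → Spec_entropy_prng_next_py seed counter (entropy_prng_next_py seed counter)

-- ===== LEMMAS AND PROOFS =====

-- ===== VERDICT (by name: the statement is the Claim_ definition above) =====
-- Python % with the positive modulus 2^32 is Lean's emod
theorem pv_fmod_pos (x : Int) : x.fmod 4294967296 = x % 4294967296 := by
  rw [Int.fmod_eq_emod]; norm_num

-- the closed-form affine step equals three LCG rounds, for any reduced state z
theorem pv_collapse (z : Int) :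
    (2940799637 * z + 3519870697) % 4294967296 =
    (1664525 * ((1664525 * ((1664525 * z + 1013904223) % 4294967296) + 1013904223) % 4294967296) + 1013904223) % 4294967296 := by
  have e1 : ((1664525 * z + 1013904223) % 4294967296 : Int) ≡ 1664525 * z + 1013904223 [ZMOD 4294967296] :=
    Int.emod_emod_of_dvd _ dvd_rfl
  have h2 : ((1664525 * ((1664525 * z + 1013904223) % 4294967296) + 1013904223) % 4294967296 : Int) ≡
      1664525 * (1664525 * z + 1013904223) + 1013904223 [ZMOD 4294967296] :=
    (Int.emod_emod_of_dvd _ dvd_rfl).trans ((e1.mul_left 1664525).add_right 1013904223)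
  have h3 := (h2.mul_left 1664525).add_right 1013904223
  have h4 : (2940799637 * z + 3519870697 : Int) ≡
      1664525 * (1664525 * (1664525 * z + 1013904223) + 1013904223) + 1013904223 [ZMOD 4294967296] := by
    have hA : (2940799637 : Int) ≡ 4611805331264703125 [ZMOD 4294967296] := by decide
    have hC : (3519870697 : Int) ≡ 2809168808033525757673 [ZMOD 4294967296] := by decide
    calc (2940799637 * z + 3519870697 : Int)
        ≡ 4611805331264703125 * z + 2809168808033525757673 [ZMOD 4294967296] := (hA.mul_right z).add hC
      _ = _ := by ring
  exact h4.trans h3.symm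

theorem entropy_prng_next_py_spec : Claim_equal_entropy_prng_next_py := by
  intro seed counter _
  unfold Spec_entropy_prng_next_py entropy_prng_next_py entropy_prng_next_py_alt
  rw [show PySem.List.pyRange 0 3 1 = [0, 1, 2] from by decide]
  simp only [List.foldl_cons, List.foldl_nil, PySem.Int.mod]
  norm_num [pv_fmod_pos]
  exact (pv_collapse ((seed + counter) % 4294967296)).symm
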